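-- pv_equiv track=rewrite | github.com/jeonkwanghwi/Algorithm-study | 프로그래머스/lv1/42840. 모의고사/모의고사.py | solution
-- ===== SOURCE A (Python) =====
-- def solution(answers):
--     first = [1, 2, 3, 4, 5] * 2000
--     first_score = 0
--
--     second = [2, 1, 2, 3, 2, 4, 2, 5] * 1250
--     second_score = 0
--
--     third = [3, 3, 1, 1, 2, 2, 4, 4, 5, 5] * 1000
--     third_score = 0
--
--     for i in range(len(answers)):
--         if answers[i] == first[i]:
--             first_score += 1
--         if answers[i] == second[i]:
--             second_score += 1
--         if answers[i] == third[i]: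
--             third_score += 1
--
--     score = [first_score, second_score, third_score]
--     result = []
--
--     for i in range(len(score)):
--         if max(score) == score[i]:
--             result.append(i + 1)
--
--     return result
-- ===== SOURCE B (Python) =====
-- def solution(answers):
--     # Histogram approach: one pass builds a counter keyed by (position mod 40, answer);
--     # each pattern's score is then read off with 40 lookups (40 = lcm of the period lengths 5, 8, 10).
--     keys = [(i % 40, a) for i, a in enumerate(answers)]
--     cnt = {}
--     for k in keys:
--         cnt[k] = cnt.get(k, 0) + 1
--     patterns = [[1, 2, 3, 4, 5],
--                 [2, 1, 2, 3, 2, 4, 2, 5],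
--                 [3, 3, 1, 1, 2, 2, 4, 4, 5, 5]]
--     scores = [sum(cnt.get((j, pat[j % len(pat)]), 0) for j in range(40)) for pat in patterns]
--     best = max(scores)
--     return [i + 1 for i, s in enumerate(scores) if s == best]
-- ===== Notes on version B (the rewrite author's own statement) =====
-- stated objective: alternative
-- what changed: Replaces A's fused per-index scan with three counters by a histogram algorithm: one pass builds a dict counting (index mod 40, answer) pairs, each pattern's score is then read off the histogram with 40 lookups (40 = lcm of the pattern periods), and the winners are selected by comprehension.
import Mathlib
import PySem

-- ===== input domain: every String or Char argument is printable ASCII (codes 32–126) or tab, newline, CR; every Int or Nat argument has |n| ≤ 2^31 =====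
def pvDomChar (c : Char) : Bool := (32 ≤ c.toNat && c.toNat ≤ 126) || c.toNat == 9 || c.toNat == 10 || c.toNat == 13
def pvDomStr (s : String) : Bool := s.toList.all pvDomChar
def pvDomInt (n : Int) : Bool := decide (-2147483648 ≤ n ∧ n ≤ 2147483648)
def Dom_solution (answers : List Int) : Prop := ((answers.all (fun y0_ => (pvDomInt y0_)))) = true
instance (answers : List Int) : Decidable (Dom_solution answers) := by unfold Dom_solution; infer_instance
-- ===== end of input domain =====

-- B replaces A's fused three-counter scan by a histogram: one pass counts (index mod 40, answer)
-- pairs into a dict, each pattern's score is read off with 40 lookups (alternative algorithm).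
-- Pre_ excludes answers longer than 10000, where A raises IndexError.


-- ===== PORT A =====
def solution (answers : List Int) : List Int :=
  let first := PySem.List.pyRepeat ([1, 2, 3, 4, 5] : List Int) 2000
  let second := PySem.List.pyRepeat ([2, 1, 2, 3, 2, 4, 2, 5] : List Int) 1250
  let third := PySem.List.pyRepeat ([3, 3, 1, 1, 2, 2, 4, 4, 5, 5] : List Int) 1000
  -- answers[i] / first[i] … : in range under Pre_solution; ported with pyGetD (exact there)
  let st := (PySem.List.pyRange 0 (PySem.List.len answers) 1).foldl
    (fun (st : Int × Int × Int) i =>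
      (if PySem.List.pyGetD answers i 0 = PySem.List.pyGetD first i 0 then st.1 + 1 else st.1,
       if PySem.List.pyGetD answers i 0 = PySem.List.pyGetD second i 0 then st.2.1 + 1 else st.2.1,
       if PySem.List.pyGetD answers i 0 = PySem.List.pyGetD third i 0 then st.2.2 + 1 else st.2.2))
    (0, 0, 0)
  let score : List Int := [st.1, st.2.1, st.2.2]
  (PySem.List.pyRange 0 (PySem.List.len score) 1).foldl
    (fun res i =>
      if (PySem.List.max? score (fun x => x)).getD 0 = PySem.List.pyGetD score i 0
      then res ++ [i + 1] else res)
    []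

-- ===== PORT B =====
def solution_alt (answers : List Int) : List Int :=
  let keys := (PySem.List.enumerate answers).map (fun p => (PySem.Int.mod p.1 40, p.2))
  let cnt := keys.foldl
    (fun (d : PySem.Dict (Int × Int) Int) k => d.insert k (d.getD k 0 + 1)) PySem.Dict.empty
  let patterns : List (List Int) :=
    [[1, 2, 3, 4, 5], [2, 1, 2, 3, 2, 4, 2, 5], [3, 3, 1, 1, 2, 2, 4, 4, 5, 5]]
  let scores := patterns.map (fun pat =>
    ((PySem.List.pyRange 0 40 1).map (fun j =>
      cnt.getD (j, PySem.List.pyGetD pat (PySem.Int.mod j (PySem.List.len pat)) 0) 0)).sum)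
  let best := (PySem.List.max? scores (fun x => x)).getD 0
  (PySem.List.enumerate scores).foldl
    (fun res p => if p.2 = best then res ++ [p.1 + 1] else res) []

-- ===== PRECONDITION & SPEC =====
-- A indexes its pre-built 10000-entry guess lists at every answer position, so it raises
-- IndexError as soon as answers has more than 10000 entries; Pre_ excludes exactly those.
def Pre_solution (answers : List Int) : Prop := answers.length ≤ 10000
instance (answers : List Int) : Decidable (Pre_solution answers) := by unfold Pre_solution; infer_instance
def pvWitness_solution : List Int := [1, 3, 2, 4, 2]

def Spec_solution (answers : List Int) (out : List Int) : Prop := out = solution_alt answers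
instance (answers : List Int) (out : List Int) : Decidable (Spec_solution answers out) := by unfold Spec_solution; infer_instance

-- ===== CLAIM (what is proved, stated in full; the proofs are below) =====
def Claim_equal_solution : Prop := ∀ (answers : List Int), Dom_solution answers → Pre_solution answers → Spec_solution answers (solution answers)

-- ===== LEMMAS AND PROOFS =====

-- indexing a k-fold repetition of p at i < k*|p| is indexing p at i mod |p|
theorem flatten_replicate_getD (p : List Int) (m k : Nat) (h : k < p.length * m) :
    ((List.replicate m p).flatten).getD k 0 = p.getD (k % p.length) 0 := by
  have hp' : p = [] ∨ 0 < p.length := by cases p <;> simp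
  rcases hp' with rfl | hp
  · simp
  induction m generalizing k with
  | zero => simp at h
  | succ m ih =>
    have h' : k < p.length * m + p.length := by
      have : p.length * (m + 1) = p.length * m + p.length := by ring
      omega
    simp only [List.replicate_succ, List.flatten_cons]
    by_cases hk : k < p.length
    · rw [List.getD_append _ _ _ _ hk, Nat.mod_eq_of_lt hk]
    · rw [List.getD_append_right _ _ _ _ (by omega : p.length ≤ k)]
      rw [ih (k - p.length) (by omega)]
      congr 1
      exact (Nat.mod_eq_sub_mod (by omega : k ≥ p.length)).symm

theorem pyRepeat_getD (p : List Int) (m : Int) (k : Nat) (h : k < p.length * m.toNat) :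
    PySem.List.pyGetD (PySem.List.pyRepeat p m) (k : Int) 0
      = PySem.List.pyGetD p (PySem.Int.mod (k : Int) (p.length : Int)) 0 := by
  rw [PySem.List.pyGetD_natCast, PySem.Int.mod_natCast k p.length, PySem.List.pyGetD_natCast]
  exact flatten_replicate_getD p m.toNat k h

-- sum(1 for x in l if C(x)) is a countP (Prop-condition wrapper around the library lemma)
theorem sum_ite_prop {a : Type} (C : a -> Prop) [DecidablePred C] (l : List a) :
    (l.map (fun x => if C x then (1:Int) else 0)).sum = ((l.countP (fun x => decide (C x)) : Nat) : Int) := by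
  rw [<- PySem.List.sum_map_ite_one_zero (fun x => decide (C x)) l]
  simp

-- summing per-key counts over a nodup key list covering L partitions the count of matches
theorem count_partition (R : List Int) (pg : Int → Int) (hR : R.Nodup)
    (L : List (Int × Int)) (h : ∀ p ∈ L, p.1 ∈ R) :
    (R.map (fun j => ((L.count (j, pg j) : Nat) : Int))).sum
      = ((L.countP (fun p => decide (p.2 = pg p.1)) : Nat) : Int) := by
  induction L with
  | nil => simp
  | cons p L ih =>
    have hmem : p.1 ∈ R := h p (List.mem_cons_self ..)
    have ih' := ih (fun q hq => h q (List.mem_cons_of_mem _ hq))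
    have hsplit : (R.map (fun j => (((p :: L).count (j, pg j) : Nat) : Int))).sum
        = (R.map (fun j => ((L.count (j, pg j) : Nat) : Int))).sum
          + (R.map (fun j => if p = (j, pg j) then (1:Int) else 0)).sum := by
      rw [← PySem.List.sum_map_add_int]
      refine congrArg List.sum (List.map_congr_left ?_)
      intro j _
      rw [List.count_cons]
      by_cases hpj : p = (j, pg j)
      · simp [hpj]
      · have hb : (p == (j, pg j)) = false := by simpa using hpj
        simp [hb, hpj]
    have hind : (R.map (fun j => if p = (j, pg j) then (1:Int) else 0)).sum
        = if p.2 = pg p.1 then (1:Int) else 0 := by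
      rw [sum_ite_prop (C := fun j => p = (j, pg j))]
      by_cases hc : p.2 = pg p.1
      · have hcong : R.countP (fun j => decide (p = (j, pg j))) = R.countP (fun j => j == p.1) := by
          apply List.countP_congr
          intro j _
          by_cases hj : j = p.1
          · subst hj; simp [Prod.ext_iff, hc, eq_comm]
          · have hne : ¬ p = (j, pg j) := fun he => hj (congrArg Prod.fst he).symm
            simp [hne, hj]
        rw [hcong]
        have : R.countP (fun j => j == p.1) = R.count p.1 := by
          simp [List.count, BEq.comm]
        rw [this, List.count_eq_one_of_mem hR hmem]
        simp [hc]
      · have : R.countP (fun j => decide (p = (j, pg j))) = 0 := by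
          rw [List.countP_eq_zero]
          intro j _ hj
          rw [decide_eq_true_eq] at hj
          exact hc (by rw [hj])
        rw [this]
        simp [hc]
    rw [hsplit, ih', hind, List.countP_cons]
    by_cases hc : p.2 = pg p.1 <;> simp [hc] <;> push_cast <;> ring

-- reducing an index mod 40 does not change its residue mod a divisor of 40
theorem mod_mod_40 (k L : Nat) (hdvd : L ∣ 40) :
    PySem.Int.mod (PySem.Int.mod (k : Int) 40) (L : Int) = PySem.Int.mod (k : Int) (L : Int) := by
  have h40 : (40 : Int) = ((40 : Nat) : Int) := by norm_cast
  rw [h40, PySem.Int.mod_natCast, PySem.Int.mod_natCast, PySem.Int.mod_natCast]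
  exact_mod_cast Nat.mod_mod_of_dvd k hdvd

-- one per-pattern count: A's fused-loop component = B's 40-bucket histogram read-off
theorem comp_eq (answers pat : List Int) (m : Int)
    (hdvd : pat.length ∣ 40)
    (hmul : answers.length ≤ pat.length * m.toNat) :
    (PySem.List.pyRange 0 (PySem.List.len answers) 1).foldl
      (fun (acc : Int) i =>
        if PySem.List.pyGetD answers i 0 = PySem.List.pyGetD (PySem.List.pyRepeat pat m) i 0
        then acc + 1 else acc) 0
    = ((PySem.List.pyRange 0 40 1).map (fun j =>
        (((PySem.List.enumerate answers).map (fun p => (PySem.Int.mod p.1 40, p.2))).foldl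
          (fun (d : PySem.Dict (Int × Int) Int) k => d.insert k (d.getD k 0 + 1)) PySem.Dict.empty).getD
          (j, PySem.List.pyGetD pat (PySem.Int.mod j (PySem.List.len pat)) 0) 0)).sum := by
  -- B side: the insert loop is Counter; getD is count; the 40-bucket sum partitions a countP
  rw [PySem.Dict.foldl_insert_getD_add_one_eq_counter]
  have hbuckets : ∀ j : Int,
      (PySem.Dict.counter ((PySem.List.enumerate answers).map (fun p => (PySem.Int.mod p.1 40, p.2)))).getD
        (j, PySem.List.pyGetD pat (PySem.Int.mod j (PySem.List.len pat)) 0) 0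
      = ((((PySem.List.enumerate answers).map (fun p => (PySem.Int.mod p.1 40, p.2))).count
          (j, PySem.List.pyGetD pat (PySem.Int.mod j (PySem.List.len pat)) 0) : Nat) : Int) := by
    intro j
    rw [PySem.Dict.getD_counter]
  simp only [hbuckets]
  rw [count_partition (PySem.List.pyRange 0 40 1)
        (fun j => PySem.List.pyGetD pat (PySem.Int.mod j (PySem.List.len pat)) 0)
        (by decide)
        ((PySem.List.enumerate answers).map (fun p => (PySem.Int.mod p.1 40, p.2)))
        (by
          intro p hp
          rw [List.mem_map] at hp
          obtain ⟨q, _, rfl⟩ := hp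
          rw [PySem.List.mem_pyRange_one]
          exact ⟨PySem.Int.mod_nonneg _ (by omega), PySem.Int.mod_lt _ (by omega)⟩)]
  -- A side: the counting fold is a countP over the index range
  rw [PySem.List.foldl_ite_add_one
        (p := fun i => PySem.List.pyGetD answers i 0
            = PySem.List.pyGetD (PySem.List.pyRepeat pat m) i 0), zero_add]
  rw [List.countP_map]
  rw [PySem.List.enumerate_eq_map_pyRange answers 0, List.countP_map]
  congr 1
  apply List.countP_congr
  intro i hi
  rw [PySem.List.mem_pyRange_one] at hi
  simp only [PySem.List.len_eq] at hi
  obtain (h0 : (0:Int) ≤ i) := hi.1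
  have hk : i = ((i.toNat : Nat) : Int) := (Int.toNat_of_nonneg h0).symm
  simp only [Function.comp_def, decide_eq_true_eq, PySem.List.len_eq]
  rw [hk, pyRepeat_getD pat m i.toNat (by omega)]
  constructor <;> intro hh <;> rw [hh] <;> congr 1
  · exact (mod_mod_40 i.toNat pat.length hdvd).symm
  · exact mod_mod_40 i.toNat pat.length hdvd

set_option maxRecDepth 8000 in
-- the winner-selection pass: A's index loop over the 3 scores = B's enumerate filter
theorem final_sel (s1 s2 s3 : Int) :
    (PySem.List.pyRange 0 (PySem.List.len [s1, s2, s3]) 1).foldl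
      (fun res i =>
        if (PySem.List.max? [s1, s2, s3] (fun x => x)).getD 0 = PySem.List.pyGetD [s1, s2, s3] i 0
        then res ++ [i + 1] else res) []
    = (PySem.List.enumerate [s1, s2, s3]).foldl
        (fun res p => if p.2 = (PySem.List.max? [s1, s2, s3] (fun x => x)).getD 0
          then res ++ [p.1 + 1] else res) [] := by
  rw [show PySem.List.len [s1, s2, s3] = 3 from rfl,
      show PySem.List.pyRange 0 3 1 = [0, 1, 2] from by decide,
      show PySem.List.enumerate [s1, s2, s3] = [(0, s1), (1, s2), (2, s3)] from rfl]
  simp only [List.foldl, PySem.List.max?_id_cons, Option.getD_some]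
  rw [show PySem.List.pyGetD [s1, s2, s3] (0 : Int) 0 = s1 from rfl,
      show PySem.List.pyGetD [s1, s2, s3] (1 : Int) 0 = s2 from rfl,
      show PySem.List.pyGetD [s1, s2, s3] (2 : Int) 0 = s3 from rfl]
  split_ifs <;>
    first
      | rfl
      | (exfalso; omega)

set_option maxRecDepth 8000 in
theorem solution_spec_aux (answers : List Int) (h : answers.length ≤ 10000) :
    solution answers = solution_alt answers := by
  simp only [solution, solution_alt, List.map]
  rw [PySem.List.foldl_prod_mk
      (f := fun (a : Int) (i : Int) =>
        if PySem.List.pyGetD answers i 0 = PySem.List.pyGetD (PySem.List.pyRepeat ([1,2,3,4,5] : List Int) 2000) i 0 then a + 1 else a)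
      (g := fun (b : Int × Int) (i : Int) =>
        (if PySem.List.pyGetD answers i 0 = PySem.List.pyGetD (PySem.List.pyRepeat ([2,1,2,3,2,4,2,5] : List Int) 1250) i 0 then b.1 + 1 else b.1,
         if PySem.List.pyGetD answers i 0 = PySem.List.pyGetD (PySem.List.pyRepeat ([3,3,1,1,2,2,4,4,5,5] : List Int) 1000) i 0 then b.2 + 1 else b.2))]
  rw [PySem.List.foldl_prod_mk
      (f := fun (a : Int) (i : Int) =>
        if PySem.List.pyGetD answers i 0 = PySem.List.pyGetD (PySem.List.pyRepeat ([2,1,2,3,2,4,2,5] : List Int) 1250) i 0 then a + 1 else a)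
      (g := fun (a : Int) (i : Int) =>
        if PySem.List.pyGetD answers i 0 = PySem.List.pyGetD (PySem.List.pyRepeat ([3,3,1,1,2,2,4,4,5,5] : List Int) 1000) i 0 then a + 1 else a)]
  dsimp only
  rw [comp_eq answers [1,2,3,4,5] 2000 (by decide) (by
        have e : ([1,2,3,4,5] : List Int).length * ((2000 : Int)).toNat = 10000 := by decide
        omega),
      comp_eq answers [2,1,2,3,2,4,2,5] 1250 (by decide) (by
        have e : ([2,1,2,3,2,4,2,5] : List Int).length * ((1250 : Int)).toNat = 10000 := by decide
        omega),
      comp_eq answers [3,3,1,1,2,2,4,4,5,5] 1000 (by decide) (by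
        have e : ([3,3,1,1,2,2,4,4,5,5] : List Int).length * ((1000 : Int)).toNat = 10000 := by decide
        omega)]
  exact final_sel _ _ _

-- ===== VERDICT (by name: the statement is the Claim_ definition above) =====
theorem solution_spec : Claim_equal_solution := by
  intro answers _ hpre
  exact solution_spec_aux answers hpre
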